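-- pv_equiv track=rewrite | github.com/sokaina-nadi/DynamicProject22 | DynamicProject22/gvns1.py | f
-- ===== SOURCE A (Python) =====
-- def f(data):
--     t = 0
--     u = 0
--     for j in range(0,len(data)):
--         s_j = t
--         f_j = s_j + data[j][1]
--         t = f_j
--
--         if f_j>data[j][2]:
--             u += 1
--         else:
--             u += 0
--     return u
-- ===== SOURCE B (Python) =====
-- def f(data):
--     def count(rows, base):
--         # Number of rows whose completion time (base + running sum of durations)
--         # exceeds its deadline, computed by divide and conquer.
--         if len(rows) <= 1:
--             if not rows:
--                 return 0
--             return 1 if base + rows[0][1] > rows[0][2] else 0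
--         mid = len(rows) // 2
--         left, right = rows[:mid], rows[mid:]
--         left_total = base + sum(r[1] for r in left)
--         return count(left, base) + count(right, left_total)
--     return count(data, 0)
-- ===== Notes on version B (the rewrite author's own statement) =====
-- stated objective: alternative
-- what changed: Replaced A's single linear accumulate-and-count loop by a divide-and-conquer recursion that splits the list in half, counts exceedances in each half independently, and offsets the right half's base time by the left half's total duration.
import Mathlib
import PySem

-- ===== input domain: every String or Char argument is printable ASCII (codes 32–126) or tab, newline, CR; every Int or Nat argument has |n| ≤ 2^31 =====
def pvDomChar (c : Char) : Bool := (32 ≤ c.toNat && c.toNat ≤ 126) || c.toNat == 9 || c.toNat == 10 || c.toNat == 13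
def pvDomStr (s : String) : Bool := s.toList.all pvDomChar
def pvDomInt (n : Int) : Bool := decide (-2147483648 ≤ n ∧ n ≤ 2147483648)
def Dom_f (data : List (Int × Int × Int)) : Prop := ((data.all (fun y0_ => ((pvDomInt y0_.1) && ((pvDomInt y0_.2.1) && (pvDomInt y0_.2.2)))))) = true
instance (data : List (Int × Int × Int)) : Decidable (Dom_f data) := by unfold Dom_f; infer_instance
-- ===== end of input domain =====

-- B counts deadline exceedances by divide and conquer (split in half, offset the
-- right half by the left half's total duration) instead of A's single linear loop.

-- ===== PORT A =====
-- the loop over state (t, u), iterating over the rows in order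
def fLoop (data : List (Int × Int × Int)) : Int × Int :=
  data.foldl (fun (st : Int × Int) row =>
    let s_j := st.1
    let f_j := s_j + row.2.1
    (f_j, if f_j > row.2.2 then st.2 + 1 else st.2 + 0)) (0, 0)

def f (data : List (Int × Int × Int)) : Int := (fLoop data).2

-- ===== PORT B =====
-- count(rows, base): divide-and-conquer count of rows whose completion time exceeds its deadline
def countDC (rows : List (Int × Int × Int)) (base : Int) : Int :=
  if rows.length ≤ 1 then
    match rows with
    | [] => 0
    | r :: _ => if base + r.2.1 > r.2.2 then 1 else 0
  else
    let mid := rows.length / 2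
    let left := rows.take mid
    let right := rows.drop mid
    let left_total := base + (left.map (fun r => r.2.1)).sum
    countDC left base + countDC right left_total
termination_by rows.length
decreasing_by
  · simp only [List.length_take]; omega
  · simp only [List.length_drop]; omega

def f_alt (data : List (Int × Int × Int)) : Int := countDC data 0

-- ===== PRECONDITION & SPEC =====
def Spec_f (data : List (Int × Int × Int)) (out : Int) : Prop := out = f_alt data
instance (data : List (Int × Int × Int)) (out : Int) : Decidable (Spec_f data out) := by unfold Spec_f; infer_instance

-- ===== CLAIM =====
def Claim_equal_f : Prop := ∀ (data : List (Int × Int × Int)), Dom_f data → Spec_f data (f data)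

-- ===== LEMMAS AND PROOFS =====
-- abbreviation for A's loop step
def stepA (st : Int × Int) (row : Int × Int × Int) : Int × Int :=
  let s_j := st.1
  let f_j := s_j + row.2.1
  (f_j, if f_j > row.2.2 then st.2 + 1 else st.2 + 0)

lemma foldl_stepA_snd (rows : List (Int × Int × Int)) (t u : Int) :
    (rows.foldl stepA (t, u)).2 = u + (rows.foldl stepA (t, 0)).2 := by
  induction rows generalizing t u with
  | nil => simp
  | cons hd tl ih =>
    simp only [List.foldl_cons, stepA]
    by_cases h : hd.2.2 < t + hd.2.1
    · simp only [if_pos h]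
      rw [ih (t + hd.2.1) (u + 1), ih (t + hd.2.1) (0 + 1)]
      ring
    · simp only [if_neg h]
      rw [ih (t + hd.2.1) (u + 0), ih (t + hd.2.1) (0 + 0)]
      ring

lemma foldl_stepA_fst (rows : List (Int × Int × Int)) (t u : Int) :
    (rows.foldl stepA (t, u)).1 = t + (rows.map (fun r => r.2.1)).sum := by
  induction rows generalizing t u with
  | nil => simp
  | cons hd tl ih =>
    simp only [List.foldl_cons, stepA, List.map_cons, List.sum_cons]
    rw [ih]
    ring

lemma countDC_eq_foldl (rows : List (Int × Int × Int)) (base : Int) :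
    countDC rows base = (rows.foldl stepA (base, 0)).2 := by
  fun_induction countDC rows base with
  | case1 base h => simp
  | case2 base r tl hc h =>
    cases tl with
    | nil =>
      simp only [List.foldl_cons, List.foldl_nil, stepA]
      simp [hc]
    | cons _ _ => simp at h
  | case3 base r tl hc h =>
    cases tl with
    | nil =>
      simp only [List.foldl_cons, List.foldl_nil, stepA]
      simp [hc]
    | cons _ _ => simp at h
  | case4 rows base hgt mid left right left_total ihl ihr =>
    rw [ihl, ihr]
    conv_rhs => rw [← List.take_append_drop mid rows]
    rw [List.foldl_append]
    have h1 : (left.foldl stepA (base, 0)).1 = left_total := by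
      rw [foldl_stepA_fst]
    have h2 := foldl_stepA_snd right (left.foldl stepA (base, 0)).1
      (left.foldl stepA (base, 0)).2
    rw [show ((left.foldl stepA (base, 0)).1, (left.foldl stepA (base, 0)).2)
        = left.foldl stepA (base, 0) from rfl] at h2
    rw [h2, h1]

-- ===== VERDICT =====
theorem f_spec : Claim_equal_f := by
  intro data _
  unfold Spec_f f_alt f fLoop
  rw [countDC_eq_foldl]
  rfl
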